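-- pv_equiv track=rewrite | github.com/fulltilte/pythoncode | #23/23-R-19071.py | F
-- ===== SOURCE A (Python) =====
-- def F(start, end):
--     if end < start:
--         return 0
--     if end == start:
--         return 1
--     k = F(start, end - 1)
--     if end % 2 == 0:
--         k += F(start, end // 2)
--     return k
-- ===== SOURCE B (Python) =====
-- def F(start, end):
--     # Bottom-up DP over end: dp[i] = F(start, start + i), built left to right.
--     if end < start:
--         return 0
--     dp = [1]
--     for e in range(start + 1, end + 1):
--         v = dp[-1]
--         if e % 2 == 0 and e // 2 >= start:
--             v += dp[e // 2 - start]
--         dp.append(v)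
--     return dp[-1]
-- ===== Notes on version B (the rewrite author's own statement) =====
-- stated objective: faster
-- what changed: Replaced the recomputing recursion F(start,end)=F(start,end-1)+[end even]F(start,end//2) by a single bottom-up DP pass that fills a table dp[i]=F(start,start+i) from start to end, each entry computed once.
import Mathlib
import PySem

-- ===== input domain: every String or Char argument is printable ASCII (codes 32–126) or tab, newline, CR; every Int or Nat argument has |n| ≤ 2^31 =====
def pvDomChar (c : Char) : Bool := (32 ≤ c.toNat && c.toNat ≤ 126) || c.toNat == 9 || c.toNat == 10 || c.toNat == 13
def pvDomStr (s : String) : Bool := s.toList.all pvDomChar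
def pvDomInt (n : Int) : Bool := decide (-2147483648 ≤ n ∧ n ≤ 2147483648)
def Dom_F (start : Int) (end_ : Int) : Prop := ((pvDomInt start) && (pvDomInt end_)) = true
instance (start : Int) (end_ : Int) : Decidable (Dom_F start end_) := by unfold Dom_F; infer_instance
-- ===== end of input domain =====

-- B replaces A's recomputing recursion by one bottom-up O(end-start) DP pass (faster, asymptotic).

-- ===== PORT A =====
-- A's recursion does not terminate on all Int inputs (for start < 0 it can cycle between
-- end = -1 and end = -2, or loop on end = 0), so it is ported with fuel (each call consumes
-- one unit); the fuel (end_ - start).toNat + 1 is a totality guard only: inside Pre_F it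
-- provably suffices, outside Pre_F (where the Python A never returns) nothing is claimed.
def fuelF : Nat → Int → Int → Int
  | 0, _, _ => 0
  | fuel + 1, start, end_ =>
    if end_ < start then 0
    else if end_ = start then 1
    else
      let k := fuelF fuel start (end_ - 1)
      if PySem.Int.mod end_ 2 = 0 then k + fuelF fuel start (PySem.Int.floordiv end_ 2) else k

def F (start : Int) (end_ : Int) : Int :=
  fuelF ((end_ - start).toNat + 1) start end_

-- ===== PORT B =====
-- Python's list append is ported as Array.push; both dp indexings are in range on every
-- input admitted by Pre_F, so getElem! matches Python's indexing there.
def F_alt (start : Int) (end_ : Int) : Int :=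
  if end_ < start then 0
  else
    let dp := (PySem.List.pyRange (start + 1) (end_ + 1) 1).foldl
      (fun (dp : Array Int) e =>
        let v := dp[dp.size - 1]!
        let v :=
          if PySem.Int.mod e 2 = 0 ∧ start ≤ PySem.Int.floordiv e 2 then
            v + dp[(PySem.Int.floordiv e 2 - start).toNat]!
          else v
        dp.push v) #[1]
    dp[dp.size - 1]!

-- ===== PRECONDITION & SPEC =====
-- Pre_F excludes exactly the inputs on which the Python A never returns (its recursion is
-- infinite, ending in RecursionError): start < 0 with end > start, except the terminating
-- diagonal end = start + 1 with end odd.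
def Pre_F (start : Int) (end_ : Int) : Prop :=
  0 ≤ start ∨ end_ ≤ start ∨ (end_ = start + 1 ∧ PySem.Int.mod end_ 2 ≠ 0)
instance (start : Int) (end_ : Int) : Decidable (Pre_F start end_) := by unfold Pre_F; infer_instance
def pvWitness_F : Int × Int := (0, 5)

def Spec_F (start : Int) (end_ : Int) (out : Int) : Prop := out = F_alt start end_
instance (start : Int) (end_ : Int) (out : Int) : Decidable (Spec_F start end_ out) := by unfold Spec_F; infer_instance

-- ===== CLAIM (what is proved, stated in full; the proofs are below) =====
def Claim_equal_F : Prop := ∀ (start : Int) (end_ : Int), Dom_F start end_ → Pre_F start end_ → Spec_F start end_ (F start end_)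

-- ===== LEMMAS AND PROOFS =====

-- Reference recurrence: gN start n = F(start, start + n), defined by well-founded recursion on n.
def gN (start : Int) : Nat → Int
  | 0 => 1
  | n + 1 =>
    if _h : PySem.Int.mod (start + (n : Int) + 1) 2 = 0 ∧
        start ≤ PySem.Int.floordiv (start + (n : Int) + 1) 2 ∧
        (PySem.Int.floordiv (start + (n : Int) + 1) 2 - start).toNat ≤ n then
      gN start n + gN start (PySem.Int.floordiv (start + (n : Int) + 1) 2 - start).toNat
    else gN start n
  termination_by n => n
  decreasing_by all_goals omega

theorem fuelF_eq_gN (fuel : Nat) : ∀ (start end_ : Int), 0 ≤ start → start ≤ end_ →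
    (end_ - start).toNat < fuel → fuelF fuel start end_ = gN start (end_ - start).toNat := by
  induction fuel with
  | zero => intro start end_ _ _ h; omega
  | succ fuel ih =>
    intro start end_ hs hse hf
    rcases eq_or_lt_of_le hse with heq | hlt
    · subst heq; simp [fuelF, gN]
    · have hne : end_ ≠ start := by omega
      have hmod : PySem.Int.mod end_ 2 = end_ % 2 :=
        PySem.Int.mod_eq_emod_of_pos (by norm_num)
      have hfd : PySem.Int.floordiv end_ 2 = end_ / 2 :=
        PySem.Int.floordiv_eq_ediv_of_pos (by norm_num)
      have hm : (end_ - start).toNat = (end_ - 1 - start).toNat + 1 := by omega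
      have he2 : start + ((end_ - 1 - start).toNat : Int) + 1 = end_ := by omega
      have hk : fuelF fuel start (end_ - 1) = gN start (end_ - 1 - start).toNat :=
        ih start (end_ - 1) hs (by omega) (by omega)
      simp only [fuelF, if_neg (show ¬ end_ < start by omega), if_neg hne, hm, gN, he2, hk]
      rw [hmod, hfd]
      by_cases hev : end_ % 2 = 0
      · rw [if_pos hev]
        by_cases hge : start ≤ end_ / 2
        · rw [dif_pos ⟨hev, hge, by omega⟩, ih start (end_ / 2) hs hge (by omega)]
        · rw [dif_neg (by tauto)]
          have hz : fuelF fuel start (end_ / 2) = 0 := by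
            cases fuel with
            | zero => rfl
            | succ f => simp only [fuelF, if_pos (show end_ / 2 < start by omega)]
          rw [hz, add_zero]
      · rw [if_neg hev, dif_neg (by tauto)]

def stepF (start : Int) (dp : Array Int) (e : Int) : Array Int :=
  let v := dp[dp.size - 1]!
  let v :=
    if PySem.Int.mod e 2 = 0 ∧ start ≤ PySem.Int.floordiv e 2 then
      v + dp[(PySem.Int.floordiv e 2 - start).toNat]!
    else v
  dp.push v

theorem getBang_toArray (l : List Int) (i : Nat) (h : i < l.length) : l.toArray[i]! = l[i] := by
  rw [Array.getElem!_eq_getD, Array.getD, dif_pos (by simpa using h)]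
  simp

theorem foldl_stepF (start : Int) (hs : 0 ≤ start) : ∀ (n : Nat),
    (PySem.List.pyRange (start + 1) (start + 1 + (n : Int)) 1).foldl (stepF start) #[1]
      = ((List.range (n + 1)).map (gN start)).toArray := by
  intro n
  induction n with
  | zero => simp [PySem.List.pyRange, gN]
  | succ n ih =>
    have hsplit : PySem.List.pyRange (start + 1) (start + 1 + ((n : Int) + 1)) 1
        = PySem.List.pyRange (start + 1) (start + 1 + (n : Int)) 1 ++ [start + 1 + (n : Int)] := by
      have := PySem.List.pyRange_one_succ_right
        (a := start + 1) (b := start + 1 + (n : Int)) (by omega)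
      rw [← this]; ring_nf
    push_cast
    rw [hsplit, List.foldl_append, ih]
    simp only [List.foldl_cons, List.foldl_nil, stepF]
    have hsize : ((List.range (n + 1)).map (gN start)).toArray.size = n + 1 := by simp
    have hlast : (((List.range (n + 1)).map (gN start)).toArray)[n]! = gN start n := by
      rw [getBang_toArray _ _ (by simp)]
      simp
    have he : start + 1 + (n : Int) = start + (n : Int) + 1 := by ring
    simp only [hsize, Nat.add_sub_cancel, hlast, he]
    rw [List.push_toArray]
    have hrange : List.range (n + 1 + 1) = List.range (n + 1) ++ [n + 1] := by
      simp [List.range_succ]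
    rw [hrange, List.map_append, List.map_singleton]
    congr 1
    congr 1
    show [_] = [gN start (n + 1)]
    simp only [gN]
    by_cases hc : PySem.Int.mod (start + (n : Int) + 1) 2 = 0 ∧
        start ≤ PySem.Int.floordiv (start + (n : Int) + 1) 2
    · have hfd : PySem.Int.floordiv (start + (n : Int) + 1) 2 = (start + (n : Int) + 1) / 2 :=
        PySem.Int.floordiv_eq_ediv_of_pos (by norm_num)
      have hle : (PySem.Int.floordiv (start + (n : Int) + 1) 2 - start).toNat ≤ n := by
        have hc2 : start ≤ (start + (n : Int) + 1) / 2 := hfd ▸ hc.2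
        have hde := Int.mul_ediv_add_emod (start + (n : Int) + 1) 2
        have hm1 : 0 ≤ (start + (n : Int) + 1) % 2 := Int.emod_nonneg _ (by norm_num)
        have hm2 : (start + (n : Int) + 1) % 2 < 2 := Int.emod_lt_of_pos _ (by norm_num)
        rw [hfd]; omega
      rw [if_pos hc, dif_pos ⟨hc.1, hc.2, hle⟩]
      have hidx : (((List.range (n + 1)).map (gN start)).toArray)[(PySem.Int.floordiv (start + (n : Int) + 1) 2 - start).toNat]! = gN start (PySem.Int.floordiv (start + (n : Int) + 1) 2 - start).toNat := by
        rw [getBang_toArray _ _ (by simp; omega)]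
        simp [List.getElem_map, List.getElem_range]
      rw [hidx]
    · rw [if_neg hc, dif_neg (by tauto)]

theorem F_alt_eq_gN (start end_ : Int) (hs : 0 ≤ start) (hse : start ≤ end_) :
    F_alt start end_ = gN start (end_ - start).toNat := by
  unfold F_alt
  rw [if_neg (by omega : ¬ end_ < start)]
  have hb : end_ + 1 = start + 1 + ((end_ - start).toNat : Int) := by omega
  show getElem! ((PySem.List.pyRange (start + 1) (end_ + 1) 1).foldl (stepF start) #[1])
      (((PySem.List.pyRange (start + 1) (end_ + 1) 1).foldl (stepF start) #[1]).size - 1) = _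
  rw [hb, foldl_stepF start hs]
  have hsize : ((List.range ((end_ - start).toNat + 1)).map (gN start)).toArray.size
      = (end_ - start).toNat + 1 := by simp
  rw [show ∀ (a : Array Int), getElem! a (a.size - 1) = a[a.size - 1]! from fun _ => rfl,
    hsize, Nat.add_sub_cancel, getBang_toArray _ _ (by simp)]
  simp

-- ===== VERDICT (by name: the statement is the Claim_ definition above) =====
theorem F_spec : Claim_equal_F := by
  intro start end_ _ hpre
  unfold Spec_F F
  by_cases hse : start ≤ end_
  · rcases hpre with hs | hle | ⟨hdiag, hodd⟩
    · rw [F_alt_eq_gN start end_ hs hse, fuelF_eq_gN _ _ _ hs hse (by omega)]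
    · have heq : end_ = start := le_antisymm hle hse
      subst heq
      rw [show (end_ - end_).toNat + 1 = 1 from by omega]
      simp [fuelF, F_alt, PySem.List.pyRange]
    · -- start < 0 diagonal: end_ = start + 1, end_ odd; both sides return 1
      subst hdiag
      rw [show (start + 1 - start).toNat + 1 = 2 from by omega]
      have hA : fuelF 2 start (start + 1) = 1 := by
        simp only [fuelF, if_neg (show ¬ start + 1 < start by omega),
          if_neg (show ¬ start + 1 = start by omega), if_neg hodd,
          show start + 1 - 1 = start from by ring]
        simp
      have hB : F_alt start (start + 1) = 1 := by
        have hr : PySem.List.pyRange (start + 1) (start + 1 + 1) 1 = [start + 1] := by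
          rw [PySem.List.pyRange_one_succ_right (by omega)]
          simp [PySem.List.pyRange]
        simp only [F_alt, if_neg (show ¬ start + 1 < start by omega), hr,
          List.foldl_cons, List.foldl_nil,
          if_neg (show ¬ (PySem.Int.mod (start + 1) 2 = 0 ∧
            start ≤ PySem.Int.floordiv (start + 1) 2) from fun h => hodd h.1)]
        decide
      rw [hA, hB]
  · -- end_ < start: both 0
    have hlt : end_ < start := by omega
    rw [show (end_ - start).toNat + 1 = 1 from by omega]
    rw [show fuelF 1 start end_ = 0 from by simp only [fuelF, if_pos hlt],
      F_alt, if_pos hlt]
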